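-- pv_equiv track=rewrite | github.com/lakshaygola/Data-Structure-Algorithms | DSA Problems with solution/ClosestNumber.py | closetNumber
-- ===== SOURCE A (Python) =====
-- def minDifference(numbers):
--     diff = float('inf')
--     for i in range(len(numbers)-1):
--         if abs(numbers[i] - numbers[i+1]) < diff:
--             diff = abs(numbers[i] - numbers[i+1])
--     return diff
--
-- def closetNumber(nums):
--     nums.sort()
--     minDiff= minDifference(nums)
--     numberList = []
--     for i in range(len(nums)):
--         for j in range(i+1, len(nums)):
--             if abs(nums[i] - nums[j]) == minDiff:
--                 numberList.append(nums[i])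
--                 numberList.append(nums[j])
--     return numberList
-- ===== SOURCE B (Python) =====
-- # B: sort, take min of adjacent differences in one pass, then emit pairs with an
-- # early-breaking scan (in a sorted list the minimum-distance partners of nums[i]
-- # form a contiguous block after i).  Like A, sorts `nums` in place.
-- def closetNumber(nums):
--     nums.sort()
--     n = len(nums)
--     if n < 2:
--         return []
--     m = min(nums[k + 1] - nums[k] for k in range(n - 1))
--     out = []
--     for i in range(n - 1):
--         for j in range(i + 1, n):
--             if nums[j] - nums[i] != m:
--                 break
--             out.append(nums[i])
--             out.append(nums[j])
--     return out
-- ===== Notes on version B (the rewrite author's own statement) =====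
-- stated objective: alternative
-- what changed: Replaces A's full all-pairs scan (guarded by a float-inf minimum search) with a single adjacent-difference pass for the minimum and, per index, an early-breaking scan that stops at the first non-minimal gap (valid because in a sorted list the minimum-distance partners of nums[i] form a contiguous block after i); on duplicate-heavy inputs the output itself is quadratic, so overall cost is comparable.
import Mathlib
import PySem

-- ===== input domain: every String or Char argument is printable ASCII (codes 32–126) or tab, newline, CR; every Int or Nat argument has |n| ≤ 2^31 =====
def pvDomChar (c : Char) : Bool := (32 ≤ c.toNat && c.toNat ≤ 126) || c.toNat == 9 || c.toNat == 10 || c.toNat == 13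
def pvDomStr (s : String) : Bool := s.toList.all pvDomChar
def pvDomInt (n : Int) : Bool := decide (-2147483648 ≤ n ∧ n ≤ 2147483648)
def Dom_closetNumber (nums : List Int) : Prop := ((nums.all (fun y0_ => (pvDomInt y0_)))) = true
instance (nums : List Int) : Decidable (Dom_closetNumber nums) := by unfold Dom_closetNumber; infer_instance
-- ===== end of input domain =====

-- B: one adjacent-difference pass for the minimum and early-breaking per-index scans instead
-- of A's full pair scan; like A, the Python B sorts `nums` in place (return values compared here).

-- ===== PORT A =====
-- float('inf') is modelled as `none`; `some d` is an integer value of `diff`.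
def minDifference (numbers : List Int) : Option Int :=
  (PySem.List.pyRange 0 ((numbers.length : Int) - 1) 1).foldl
    (fun diff i =>
      match diff with
      | none => some |PySem.List.pyGetD numbers i 0 - PySem.List.pyGetD numbers (i+1) 0|
      | some v =>
          if |PySem.List.pyGetD numbers i 0 - PySem.List.pyGetD numbers (i+1) 0| < v
          then some |PySem.List.pyGetD numbers i 0 - PySem.List.pyGetD numbers (i+1) 0|
          else some v) none

def closetNumber (nums : List Int) : List Int :=
  let s := PySem.List.sorted nums (fun x => x) false
  let minDiff := minDifference s
  (PySem.List.pyRange 0 (s.length : Int) 1).foldl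
    (fun acc i =>
      (PySem.List.pyRange (i+1) (s.length : Int) 1).foldl
        (fun acc2 j =>
          if some |PySem.List.pyGetD s i 0 - PySem.List.pyGetD s j 0| = minDiff
          then acc2 ++ [PySem.List.pyGetD s i 0, PySem.List.pyGetD s j 0]
          else acc2) acc) []

-- ===== PORT B =====
-- inner `for j … break` loop of Source B: scan while nums[j] - x == m, stop at the first mismatch
def scanFrom (s : List Int) (m x : Int) (j : Nat) (acc : List Int) : List Int :=
  if _h : j < s.length then
    if s.getD j 0 - x = m then scanFrom s m x (j+1) (acc ++ [x, s.getD j 0])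
    else acc
  else acc
termination_by s.length - j

def closetNumber_alt (nums : List Int) : List Int :=
  let s := PySem.List.sorted nums (fun x => x) false
  if s.length < 2 then [] else
    let m := match (List.range (s.length - 1)).map (fun k => s.getD (k+1) 0 - s.getD k 0) with
             | [] => 0   -- unreachable: length ≥ 2
             | d :: ds => ds.foldl min d
    (List.range (s.length - 1)).foldl (fun acc i => scanFrom s m (s.getD i 0) (i+1) acc) []

-- ===== PRECONDITION & SPEC =====
def Spec_closetNumber (nums : List Int) (out : List Int) : Prop := out = closetNumber_alt nums
instance (nums : List Int) (out : List Int) : Decidable (Spec_closetNumber nums out) := by unfold Spec_closetNumber; infer_instance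

-- ===== CLAIM (what is proved, stated in full; the proofs are below) =====
def Claim_equal_closetNumber : Prop := ∀ (nums : List Int), Dom_closetNumber nums → Spec_closetNumber nums (closetNumber nums)

-- ===== LEMMAS AND PROOFS =====

-- the two cores, with the sorted list abstracted out
def pvAcore (s : List Int) : List Int :=
  (PySem.List.pyRange 0 (s.length : Int) 1).foldl
    (fun acc i =>
      (PySem.List.pyRange (i+1) (s.length : Int) 1).foldl
        (fun acc2 j =>
          if some |PySem.List.pyGetD s i 0 - PySem.List.pyGetD s j 0| = minDifference s
          then acc2 ++ [PySem.List.pyGetD s i 0, PySem.List.pyGetD s j 0]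
          else acc2) acc) []

def pvBcore (s : List Int) : List Int :=
  if s.length < 2 then [] else
    let m := match (List.range (s.length - 1)).map (fun k => s.getD (k+1) 0 - s.getD k 0) with
             | [] => 0
             | d :: ds => ds.foldl min d
    (List.range (s.length - 1)).foldl (fun acc i => scanFrom s m (s.getD i 0) (i+1) acc) []

theorem pvA_eq_core (nums : List Int) :
    closetNumber nums = pvAcore (PySem.List.sorted nums (fun x => x) false) := rfl

theorem pvB_eq_core (nums : List Int) :
    closetNumber_alt nums = pvBcore (PySem.List.sorted nums (fun x => x) false) := rfl

theorem pvFoldlConst {α β : Type} (l : List α) (acc : β) :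
    l.foldl (fun a _ => a) acc = acc := by
  induction l generalizing acc with
  | nil => rfl
  | cons a t ih => simp [List.foldl, ih acc]

theorem pvFoldlMin_le (l : List Int) : ∀ v : Int, l.foldl min v ≤ v := by
  induction l with
  | nil => intro v; simp
  | cons a t ih => intro v; exact le_trans (ih (min v a)) (min_le_left _ _)

theorem pvFoldlMin_le_mem (l : List Int) : ∀ (v x : Int), x ∈ l → l.foldl min v ≤ x := by
  induction l with
  | nil => intro v x hx; cases hx
  | cons a t ih =>
      intro v x hx
      rcases List.mem_cons.mp hx with rfl | hx
      · exact le_trans (pvFoldlMin_le t (min v x)) (min_le_right _ _)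
      · exact ih _ _ hx

theorem pvFoldlMin_ge (l : List Int) : ∀ (v c : Int), c ≤ v → (∀ x ∈ l, c ≤ x) → c ≤ l.foldl min v := by
  induction l with
  | nil => intro v c hv _; simpa using hv
  | cons a t ih =>
      intro v c hv hl
      exact ih _ _ (le_min hv (hl a (List.mem_cons_self))) (fun x hx => hl x (List.mem_cons_of_mem _ hx))

theorem pvOptMinFoldG {α : Type} (g : α → Int) (l : List α) : ∀ v : Int,
    l.foldl (fun o k =>
        match o with
        | none => some (g k)
        | some w => if g k < w then some (g k) else some w) (some v)
      = some ((l.map g).foldl min v) := by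
  induction l with
  | nil => intro v; rfl
  | cons a t ih =>
      intro v
      have hstep : (match some v with
          | none => some (g a)
          | some w => if g a < w then some (g a) else some w) = some (min v (g a)) := by
        simp only []
        split_ifs with h <;> simp [min_def] <;> omega
      simp only [List.foldl, List.map, hstep, ih]

theorem pvMono (s : List Int) (hp : s.Pairwise (fun a b => a ≤ b)) :
    ∀ p q : Nat, p ≤ q → q < s.length → s.getD p 0 ≤ s.getD q 0 := by
  intro p q hpq hq
  rcases Nat.lt_or_ge p q with h | h
  · have := (List.pairwise_iff_getElem.mp hp) p q (lt_trans h hq) hq h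
    rwa [List.getD_eq_getElem s 0 (lt_trans h hq), List.getD_eq_getElem s 0 hq]
  · have : p = q := le_antisymm hpq h
    simp [this]

theorem pvPairBound (s : List Int) (m : Int) (hm0 : 0 ≤ m)
    (hadj : ∀ k : Nat, k + 1 < s.length → m ≤ s.getD (k+1) 0 - s.getD k 0) :
    ∀ p q : Nat, p < q → q < s.length → m ≤ s.getD q 0 - s.getD p 0 := by
  have key : ∀ d p, p + d < s.length → 0 < d → m ≤ s.getD (p + d) 0 - s.getD p 0 := by
    intro d
    induction d with
    | zero => intro p _ h; omega
    | succ d ih =>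
        intro p hlt _
        rcases Nat.eq_zero_or_pos d with rfl | hd
        · simpa using hadj p (by omega)
        · have h1 := ih p (by omega) hd
          have h2 := hadj (p + d) (by omega)
          have : p + d + 1 = p + (d + 1) := by omega
          rw [this] at h2
          omega
  intro p q hpq hq
  have := key (q - p) p (by omega) (by omega)
  rwa [show p + (q - p) = q by omega] at this

theorem pvInnerEq (s : List Int) (m : Int)
    (hmono : ∀ p q : Nat, p ≤ q → q < s.length → s.getD p 0 ≤ s.getD q 0)
    (hpair : ∀ p q : Nat, p < q → q < s.length → m ≤ s.getD q 0 - s.getD p 0)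
    (i : Nat) :
    ∀ (d j : Nat), s.length - j = d → i < j → ∀ acc : List Int,
      (PySem.List.pyRange (j : Int) (s.length : Int) 1).foldl
        (fun acc2 jj =>
          if some |s.getD i 0 - PySem.List.pyGetD s jj 0| = some m
          then acc2 ++ [s.getD i 0, PySem.List.pyGetD s jj 0]
          else acc2) acc
      = scanFrom s m (s.getD i 0) j acc := by
  intro d
  induction d with
  | zero =>
      intro j hd hij acc
      rw [PySem.List.pyRange_one_eq_nil (by omega : (s.length : Int) ≤ (j : Int))]
      rw [scanFrom, dif_neg (by omega : ¬ j < s.length)]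
      rfl
  | succ d ih =>
      intro j hd hij acc
      have hj : j < s.length := by omega
      by_cases hc : s.getD j 0 - s.getD i 0 = m
      · -- match at j: both sides append and continue
        have habs : |s.getD i 0 - s.getD j 0| = s.getD j 0 - s.getD i 0 := by
          rw [abs_sub_comm]
          exact abs_of_nonneg (by have := hmono i j (le_of_lt hij) hj; omega)
        have hr : scanFrom s m (s.getD i 0) j acc
            = scanFrom s m (s.getD i 0) (j+1) (acc ++ [s.getD i 0, s.getD j 0]) := by
          rw [scanFrom, dif_pos hj, if_pos hc]
        rw [hr, ← ih (j+1) (by omega) (by omega)]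
        rw [PySem.List.pyRange_one_cons (by omega : (j : Int) < (s.length : Int))]
        simp only [List.foldl, PySem.List.pyGetD_natCast]
        rw [if_pos (by rw [habs, hc] : some |s.getD i 0 - s.getD j 0| = some m)]
        rw [show ((j : Int) + 1) = ((j + 1 : Nat) : Int) by push_cast; ring]
      · -- mismatch at j: every later index also mismatches, both sides return acc
        have hfold : (PySem.List.pyRange (j : Int) (s.length : Int) 1).foldl
            (fun acc2 jj =>
              if some |s.getD i 0 - PySem.List.pyGetD s jj 0| = some m
              then acc2 ++ [s.getD i 0, PySem.List.pyGetD s jj 0]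
              else acc2) acc = acc := by
          rw [PySem.List.foldl_congr_mem _ _ (fun a (_ : Int) => a) acc ?_]
          · exact pvFoldlConst _ acc
          · intro acc2 jj hjj
            rcases PySem.List.mem_pyRange_one.mp hjj with ⟨h1, h2⟩
            have h0 : jj = ((jj.toNat : Nat) : Int) := by omega
            rw [h0, PySem.List.pyGetD_natCast]
            have hq1 : j ≤ jj.toNat := by omega
            have hq2 : jj.toNat < s.length := by omega
            have hub : m ≤ s.getD j 0 - s.getD i 0 := hpair i j hij hj
            have hgt : s.getD j 0 ≤ s.getD jj.toNat 0 := hmono j jj.toNat hq1 hq2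
            have hxle : s.getD i 0 ≤ s.getD jj.toNat 0 :=
              hmono i jj.toNat (by omega) hq2
            have habs : |s.getD i 0 - s.getD jj.toNat 0| = s.getD jj.toNat 0 - s.getD i 0 := by
              rw [abs_sub_comm]; exact abs_of_nonneg (by omega)
            rw [if_neg]
            simp only [habs, Option.some.injEq]
            omega
        rw [hfold, scanFrom, dif_pos hj, if_neg hc]

theorem pvMinDiffEq (s : List Int)
    (hmono : ∀ p q : Nat, p ≤ q → q < s.length → s.getD p 0 ≤ s.getD q 0)
    (h2 : 2 ≤ s.length)
    (d : Int) (ds : List Int)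
    (hl : (List.range (s.length - 1)).map (fun k => s.getD (k+1) 0 - s.getD k 0) = d :: ds) :
    minDifference s = some (ds.foldl min d) := by
  unfold minDifference
  rw [show ((s.length : Int) - 1) = ((s.length - 1 : Nat) : Int) by omega]
  rw [PySem.List.pyRange_zero_natCast, List.foldl_map]
  rw [PySem.List.foldl_congr_mem _ _
      (fun o k =>
        match o with
        | none => some (s.getD (k+1) 0 - s.getD k 0)
        | some w => if s.getD (k+1) 0 - s.getD k 0 < w
                    then some (s.getD (k+1) 0 - s.getD k 0) else some w) none ?_]
  · obtain ⟨a, t, hrt, ha, hds⟩ := List.map_eq_cons_iff.mp hl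
    rw [hrt]
    simp only [List.foldl]
    rw [pvOptMinFoldG (fun k => s.getD (k+1) 0 - s.getD k 0) t, hds, ha]
  · intro acc k hk
    have hk' : k < s.length - 1 := List.mem_range.mp hk
    have habs : |PySem.List.pyGetD s (k : Int) 0 - PySem.List.pyGetD s ((k : Int) + 1) 0|
        = s.getD (k+1) 0 - s.getD k 0 := by
      rw [show ((k : Int) + 1) = ((k + 1 : Nat) : Int) by push_cast; ring]
      rw [PySem.List.pyGetD_natCast, PySem.List.pyGetD_natCast, abs_sub_comm]
      exact abs_of_nonneg (by have := hmono k (k+1) (by omega) (by omega); omega)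
    rw [habs]

theorem pvCoreEq (s : List Int) (hp : s.Pairwise (fun a b => a ≤ b)) :
    pvAcore s = pvBcore s := by
  by_cases h2 : s.length < 2
  · -- length 0 or 1: A collects nothing (minDiff is inf), B returns [] at once
    rw [pvBcore, if_pos h2]
    interval_cases h : s.length
    · rw [List.length_eq_zero_iff.mp h]
      rfl
    · obtain ⟨a, rfl⟩ := List.length_eq_one_iff.mp h
      simp [pvAcore, PySem.List.pyRange_one_cons (show (0 : Int) < 1 by norm_num)]
  · have h2 : 2 ≤ s.length := by omega
    have hmono := pvMono s hp
    cases hl : (List.range (s.length - 1)).map (fun k => s.getD (k+1) 0 - s.getD k 0) with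
    | nil =>
        exfalso
        have := congrArg List.length hl
        simp [List.length_range] at this
        omega
    | cons d ds =>
        have hmd := pvMinDiffEq s hmono h2 d ds hl
        have hadj : ∀ k : Nat, k + 1 < s.length → ds.foldl min d ≤ s.getD (k+1) 0 - s.getD k 0 := by
          intro k hk
          have hmem : s.getD (k+1) 0 - s.getD k 0 ∈ d :: ds := by
            rw [← hl]
            exact List.mem_map.mpr ⟨k, List.mem_range.mpr (by omega), rfl⟩
          rcases List.mem_cons.mp hmem with h | h
          · rw [h]; exact pvFoldlMin_le ds d
          · exact pvFoldlMin_le_mem ds d _ h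
        have hm0 : 0 ≤ ds.foldl min d := by
          apply pvFoldlMin_ge
          · have hmem : d ∈ d :: ds := List.mem_cons_self
            rw [← hl] at hmem
            obtain ⟨k, hk, hkd⟩ := List.mem_map.mp hmem
            have := hmono k (k+1) (by omega) (by have := List.mem_range.mp hk; omega)
            omega
          · intro x hx
            have hmem : x ∈ d :: ds := List.mem_cons_of_mem _ hx
            rw [← hl] at hmem
            obtain ⟨k, hk, hkd⟩ := List.mem_map.mp hmem
            have := hmono k (k+1) (by omega) (by have := List.mem_range.mp hk; omega)
            omega
        have hpair := pvPairBound s (ds.foldl min d) hm0 hadj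
        rw [pvBcore, if_neg (by omega), hl]
        rw [pvAcore, hmd, PySem.List.pyRange_zero_natCast, List.foldl_map]
        have hsplit : List.range s.length = List.range (s.length - 1) ++ [s.length - 1] := by
          conv_lhs => rw [show s.length = (s.length - 1) + 1 by omega]
          rw [List.range_succ]
        rw [hsplit, List.foldl_append]
        have hlast : ∀ acc : List Int,
            List.foldl (fun acc (k : Nat) =>
              (PySem.List.pyRange ((k : Int) + 1) (s.length : Int) 1).foldl
                (fun acc2 j =>
                  if some |PySem.List.pyGetD s (k : Int) 0 - PySem.List.pyGetD s j 0| = some (ds.foldl min d)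
                  then acc2 ++ [PySem.List.pyGetD s (k : Int) 0, PySem.List.pyGetD s j 0]
                  else acc2) acc) acc [s.length - 1] = acc := by
          intro acc
          simp only [List.foldl]
          rw [PySem.List.pyRange_one_eq_nil (by omega : (s.length : Int) ≤ ((s.length - 1 : Nat) : Int) + 1)]
          rfl
        rw [hlast]
        apply PySem.List.foldl_congr_mem
        intro acc k hk
        have hk' : k < s.length - 1 := List.mem_range.mp hk
        simp only [PySem.List.pyGetD_natCast]
        rw [show ((k : Int) + 1) = ((k + 1 : Nat) : Int) by push_cast; ring]
        exact pvInnerEq s (ds.foldl min d) hmono hpair k (s.length - (k+1)) (k+1) rfl (by omega) acc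

-- ===== VERDICT (by name: the statement is the Claim_ definition above) =====
theorem closetNumber_spec : Claim_equal_closetNumber := by
  intro nums _
  unfold Spec_closetNumber
  rw [pvA_eq_core, pvB_eq_core]
  exact pvCoreEq _ (PySem.List.sorted_pairwise nums (fun x => x))
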